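-- pv_equiv track=rewrite | github.com/aibackender/a0-clf-cognition-layers | clf/verification_guardian.py | _segments
-- ===== SOURCE A (Python) =====
-- def _segments(tokens:list[str])->list[list[str]]:
--     segs=[]; cur=[]
--     for t in tokens:
--         if t in {"|",";","&&","||","(",")"}:
--             if cur: segs.append(cur); cur=[]
--             segs.append([t])
--         else: cur.append(t)
--     if cur: segs.append(cur)
--     return segs
-- ===== SOURCE B (Python) =====
-- SEPS = {"|", ";", "&&", "||", "(", ")"}
--
-- def _segments(tokens: list[str]) -> list[list[str]]:
--     out = []
--     i, n = 0, len(tokens)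
--     while i < n:
--         if tokens[i] in SEPS:
--             out.append([tokens[i]])
--             i += 1
--         else:
--             j = i
--             while j < n and tokens[j] not in SEPS:
--                 j += 1
--             out.append(tokens[i:j])
--             i = j
--     return out
-- ===== Notes on version B (the rewrite author's own statement) =====
-- stated objective: alternative
-- what changed: Replaces A's accumulate-and-flush loop (mutable current-segment buffer flushed at separators and at the end) with an index-based run scanner that emits each separator as a singleton and each maximal non-separator run as one slice, so no pending buffer ever exists.
import Mathlib
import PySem

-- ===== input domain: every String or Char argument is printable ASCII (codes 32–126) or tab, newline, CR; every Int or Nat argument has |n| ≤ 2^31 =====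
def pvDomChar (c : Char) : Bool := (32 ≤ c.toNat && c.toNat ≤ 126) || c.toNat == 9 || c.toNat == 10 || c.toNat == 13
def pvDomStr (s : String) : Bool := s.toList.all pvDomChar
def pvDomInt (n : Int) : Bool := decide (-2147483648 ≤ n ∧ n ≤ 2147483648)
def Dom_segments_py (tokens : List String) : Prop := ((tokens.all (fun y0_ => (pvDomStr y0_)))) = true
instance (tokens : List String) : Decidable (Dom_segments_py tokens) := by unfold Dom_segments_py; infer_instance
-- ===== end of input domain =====

-- B replaces A's accumulate-and-flush loop with a run scanner (alternative decomposition, same cost); return values proved equal on all inputs.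

-- ===== PORT A =====
-- shared: the separator set {"|",";","&&","||","(",")"}
def pvIsSep (t : String) : Bool :=
  t == "|" || t == ";" || t == "&&" || t == "||" || t == "(" || t == ")"

-- A's loop: state (segs, cur); flush cur at separators and at the end
def segA_loop : List String → List (List String) → List String → List (List String)
  | [], segs, cur => if cur.isEmpty then segs else segs ++ [cur]
  | t :: ts, segs, cur =>
    if pvIsSep t then
      segA_loop ts ((if cur.isEmpty then segs else segs ++ [cur]) ++ [[t]]) []
    else
      segA_loop ts segs (cur ++ [t])

def segments_py (tokens : List String) : List (List String) :=
  segA_loop tokens [] []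

-- ===== PORT B =====
-- B's inner while loop: take the maximal run of tokens with pvIsSep = k, return (run, rest)
def pvTakeRun (k : Bool) : List String → List String × List String
  | [] => ([], [])
  | t :: ts =>
    if pvIsSep t == k then
      let p := pvTakeRun k ts
      (t :: p.1, p.2)
    else ([], t :: ts)

theorem pvTakeRun_len (k : Bool) (ts : List String) :
    (pvTakeRun k ts).2.length ≤ ts.length := by
  induction ts with
  | nil => simp [pvTakeRun]
  | cons t ts ih =>
    simp only [pvTakeRun]
    split
    · exact Nat.le_succ_of_le ih
    · simp

-- B's outer while loop: emit singleton separators, and maximal non-separator runs as one segment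
def segB_go : List String → List (List String)
  | [] => []
  | t :: ts =>
    if pvIsSep t then
      [t] :: segB_go ts
    else
      (t :: (pvTakeRun false ts).1) :: segB_go (pvTakeRun false ts).2
  termination_by ts => ts.length
  decreasing_by
  · simp
  · exact Nat.lt_succ_of_le (pvTakeRun_len false ts)

def segments_py_alt (tokens : List String) : List (List String) :=
  segB_go tokens

-- ===== PRECONDITION & SPEC =====
def Spec_segments_py (tokens : List String) (out : List (List String)) : Prop := out = segments_py_alt tokens
instance (tokens : List String) (out : List (List String)) : Decidable (Spec_segments_py tokens out) := by unfold Spec_segments_py; infer_instance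

-- ===== CLAIM (what is proved, stated in full; the proofs are below) =====
def Claim_equal_segments_py : Prop := ∀ (tokens : List String), Dom_segments_py tokens → Spec_segments_py tokens (segments_py tokens)

-- ===== LEMMAS AND PROOFS =====

theorem segA_loop_prefix (ts : List String) :
    ∀ segs cur, segA_loop ts segs cur = segs ++ segA_loop ts [] cur := by
  induction ts with
  | nil =>
    intro segs cur
    simp only [segA_loop]
    split_ifs <;> simp
  | cons t ts ih =>
    intro segs cur
    simp only [segA_loop]
    split_ifs with h h2
    · rw [ih, ih]; simp; rw [ih [[t]] []]; simp
    · rw [ih, ih]; simp; rw [ih [cur, [t]] []]; simp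
    · exact ih segs (cur ++ [t])

theorem pvTakeRun_false_nonsep (l : List String) (h : ∀ x ∈ l, pvIsSep x = false) :
    ∀ ts, pvTakeRun false (l ++ ts) = (l ++ (pvTakeRun false ts).1, (pvTakeRun false ts).2) := by
  induction l with
  | nil => intro ts; rfl
  | cons c l ih =>
    intro ts
    have hc : pvIsSep c = false := h c (by simp)
    simp [pvTakeRun, hc, ih (fun x hx => h x (by simp [hx]))]

theorem segA_eq_segB (ts : List String) :
    ∀ cur, (∀ x ∈ cur, pvIsSep x = false) →
      segA_loop ts [] cur = segB_go (cur ++ ts) := by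
  induction ts with
  | nil =>
    intro cur h
    cases cur with
    | nil => simp [segA_loop, segB_go]
    | cons c cur' =>
      have hc : pvIsSep c = false := h c (by simp)
      have hrun : pvTakeRun false cur' = (cur', []) := by
        have := pvTakeRun_false_nonsep cur' (fun x hx => h x (by simp [hx])) []
        simpa [pvTakeRun] using this
      simp [segA_loop, segB_go, hc, hrun]
  | cons t ts ih =>
    intro cur h
    have hB : segA_loop ts [] [] = segB_go ts := by simpa using ih [] (by simp)
    by_cases hsep : pvIsSep t
    · cases cur with
      | nil =>
        rw [show segA_loop (t :: ts) [] [] = segA_loop ts [[t]] [] from by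
              simp [segA_loop, hsep]]
        rw [segA_loop_prefix]
        simp [segB_go, hsep, hB]
      | cons c cur' =>
        have hc : pvIsSep c = false := h c (by simp)
        have htr : pvTakeRun false (cur' ++ t :: ts) = (cur', t :: ts) := by
          have := pvTakeRun_false_nonsep cur' (fun x hx => h x (by simp [hx])) (t :: ts)
          simpa [pvTakeRun, hsep] using this
        rw [show segA_loop (t :: ts) [] (c :: cur') = segA_loop ts [c :: cur', [t]] [] from by
              simp [segA_loop, hsep]]
        rw [segA_loop_prefix]
        simp [segB_go, hsep, hc, htr, hB]
    · have h' : ∀ x ∈ cur ++ [t], pvIsSep x = false := by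
        intro x hx
        rcases List.mem_append.mp hx with hx | hx
        · exact h x hx
        · simp at hx
          simpa [hx] using (by simpa using hsep : pvIsSep t = false)
      have := ih (cur ++ [t]) h'
      simp only [segA_loop, hsep, Bool.false_eq_true, ite_false]
      simpa [List.append_assoc] using this

-- ===== VERDICT (by name: the statement is the Claim_ definition above) =====
theorem segments_py_spec : Claim_equal_segments_py := by
  intro tokens _
  unfold Spec_segments_py segments_py segments_py_alt
  simpa using segA_eq_segB tokens [] (by simp)
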